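-- pv_equiv track=rewrite | github.com/wahhajjaved/large_language_maniacs | downloaded_data/ctssb/cache/t2jrbot_342fbd9a2df1e11a4331f675729e68d53999d8cc_after.py | __recv
-- ===== SOURCE A (Python) =====
-- class Error(Exception):
--     pass
--
-- def __recv(msg):
--     prefix = ""
--
--     if msg.startswith(":"):
--         prefix, sep, msg = msg.partition(" ")
--         prefix = prefix[1:]
--         if sep != " ":
--             raise Error("received message has malformed prefix", sep)
--
--     command, _, paramstr = msg.partition(" ")
--
--     params = []
--     while paramstr:
--         if paramstr.startswith(":"):
--             param = paramstr[1:]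
--             paramstr = ""
--         else:
--             param, _, paramstr = paramstr.partition(" ")
--         params.append(param)
--
--     return prefix, command, params
-- ===== SOURCE B (Python) =====
-- class Error(Exception):
--     pass
--
--
-- def __recv(msg):
--     # Tokenize the parameter remainder with a single find/split instead of
--     # repeatedly re-partitioning it in a loop.
--     prefix = ""
--     if msg.startswith(":"):
--         if " " not in msg:
--             raise Error("received message has malformed prefix", "")
--         prefix, msg = msg.split(" ", 1)
--         prefix = prefix[1:]
--
--     command, _, paramstr = msg.partition(" ")
--
--     if not paramstr:
--         params = []
--     elif paramstr.startswith(":"):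
--         params = [paramstr[1:]]
--     else:
--         k = paramstr.find(" :")
--         if k == -1:
--             params = paramstr.split(" ")
--             if params[-1] == "":
--                 params.pop()
--         else:
--             params = paramstr[:k].split(" ") + [paramstr[k + 2:]]
--
--     return prefix, command, params
-- ===== Notes on version B (the rewrite author's own statement) =====
-- stated objective: alternative
-- what changed: A's while-loop that repeatedly re-partitions the parameter string is replaced by a loop-free decomposition: a single find of the space-colon marker locates the trailing parameter, one split on spaces yields the middle parameters (dropping a trailing empty piece), and the prefix is taken with one bounded split.
import Mathlib
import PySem

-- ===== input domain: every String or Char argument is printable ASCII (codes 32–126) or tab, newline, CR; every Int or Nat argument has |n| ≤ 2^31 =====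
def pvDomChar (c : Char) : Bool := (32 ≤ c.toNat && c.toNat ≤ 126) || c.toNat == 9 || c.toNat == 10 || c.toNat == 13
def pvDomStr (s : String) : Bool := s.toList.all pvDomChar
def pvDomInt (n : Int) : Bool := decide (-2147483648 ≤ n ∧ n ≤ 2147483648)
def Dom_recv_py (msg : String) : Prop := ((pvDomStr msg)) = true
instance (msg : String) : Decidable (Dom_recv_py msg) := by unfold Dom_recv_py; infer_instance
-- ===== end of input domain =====

-- B replaces A's repeated-partition while-loop over the parameter string by a single
-- find(" :")/split(" ") decomposition with no loop; equivalence of the return value is proved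
-- on all messages on which A does not raise (Pre_ excludes messages with a malformed prefix).

-- ===== PORT A =====

-- A's while-loop over paramstr; partition(" ") is ported exactly as
-- takeWhile/dropWhile at the first space (before, sep present?, after).
def recvParamsA (cs : List Char) : List String :=
  match cs with
  | [] => []
  | c :: rest =>
    if c = ':' then [String.ofList rest]                       -- param = paramstr[1:]; paramstr = ""
    else
      let param := (c :: rest).takeWhile (fun x => x != ' ')   -- param, _, paramstr = paramstr.partition(" ")
      let rest2 := ((c :: rest).dropWhile (fun x => x != ' ')).drop 1
      String.ofList param :: recvParamsA rest2
termination_by cs.length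
decreasing_by
  have h := List.length_dropWhile_le (fun x => x != ' ') (c :: rest)
  simp at h ⊢
  omega

-- command, _, paramstr = msg.partition(" "); then the params loop
def recvTailA (pre : String) (cs : List Char) : String × String × List String :=
  let command := cs.takeWhile (fun x => x != ' ')
  let paramstr := (cs.dropWhile (fun x => x != ' ')).drop 1
  (pre, String.ofList command, recvParamsA paramstr)

def recv_py (msg : String) : String × String × List String :=
  let cs := msg.toList
  if PySem.Chars.startswith cs [':'] then
    -- prefix, sep, msg = msg.partition(" "); prefix = prefix[1:]
    let pre := cs.takeWhile (fun x => x != ' ')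
    match cs.dropWhile (fun x => x != ' ') with
    | [] => (String.ofList pre.tail, "", [])                  -- sep ≠ " ": Python raises Error; excluded by Pre_
    | _ :: msg' => recvTailA (String.ofList pre.tail) msg'
  else
    recvTailA "" cs

-- ===== PORT B =====

-- paramstr.split(" "): exact as List.splitOn ' ' on code points (keeps empty pieces)
def splitSp (cs : List Char) : List String := (cs.splitOn ' ').map String.ofList

def recvParamsB (ps : List Char) : List String :=
  if ps = [] then []                                           -- if not paramstr: params = []
  else if PySem.Chars.startswith ps [':'] then [String.ofList (ps.drop 1)]
  else
    let k := PySem.Chars.find ps [' ', ':']                    -- k = paramstr.find(" :")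
    if k = -1 then
      let params := splitSp ps
      if params.getLast? = some "" then params.dropLast else params   -- drop the trailing empty piece
    else
      splitSp (PySem.List.slice ps none (some k))
        ++ [String.ofList (PySem.List.slice ps (some (k + 2)) none)]

-- command, _, paramstr = msg.partition(" "), ported exactly via the first-space index
def recvTailB (pre : String) (cs : List Char) : String × String × List String :=
  let j := PySem.Chars.find cs [' ']
  if j = -1 then (pre, String.ofList cs, recvParamsB [])
  else
    (pre, String.ofList (PySem.List.slice cs none (some j)),
      recvParamsB (PySem.List.slice cs (some (j + 1)) none))

def recv_py_alt (msg : String) : String × String × List String :=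
  let cs := msg.toList
  if PySem.Chars.startswith cs [':'] then
    let i := PySem.Chars.find cs [' ']                         -- " " not in msg → raise; else msg.split(" ", 1)
    if i = -1 then ("", "", [])                                -- Python raises Error; excluded by Pre_
    else
      recvTailB (String.ofList ((PySem.List.slice cs none (some i)).drop 1))
        (PySem.List.slice cs (some (i + 1)) none)
  else recvTailB "" cs

-- ===== PRECONDITION & SPEC =====
-- Pre_ excludes exactly the messages with a malformed prefix (":..." with no space), on which
-- the Python raises Error; A returns on every other input.
def Pre_recv_py (msg : String) : Prop :=
  PySem.Chars.startswith msg.toList [':'] = true → ' ' ∈ msg.toList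
instance (msg : String) : Decidable (Pre_recv_py msg) := by unfold Pre_recv_py; infer_instance

def pvWitness_recv_py : String := ":nick!user@host PRIVMSG #chan :hello world"

def Spec_recv_py (msg : String) (out : String × String × List String) : Prop := out = recv_py_alt msg
instance (msg : String) (out : String × String × List String) : Decidable (Spec_recv_py msg out) := by unfold Spec_recv_py; infer_instance

-- ===== CLAIM (what is proved, stated in full; the proofs are below) =====
def Claim_equal_recv_py : Prop := ∀ (msg : String), Dom_recv_py msg → Pre_recv_py msg → Spec_recv_py msg (recv_py msg)

-- ===== LEMMAS AND PROOFS =====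

-- facts about PySem.Chars.find.go for the patterns [' '] and [' ', ':']

theorem go_nonneg (sub : List Char) (hsub : sub ≠ []) :
    ∀ (l : List Char) (k : ℕ), PySem.Chars.find.go sub l k = -1 ∨ (k : ℤ) ≤ PySem.Chars.find.go sub l k := by
  intro l
  induction l with
  | nil => intro k; rw [PySem.Chars.find.go.eq_1]; simp [List.isEmpty_iff, hsub]
  | cons x xs ih =>
    intro k
    rw [PySem.Chars.find.go.eq_2]
    split
    · right; simp
    · rcases ih (k + 1) with h | h
      · left; exact h
      · right; push_cast at h ⊢; omega

theorem go_shift (sub : List Char) (hsub : sub ≠ []) (l : List Char) (k : ℕ) :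
    PySem.Chars.find.go sub l k =
      if PySem.Chars.find.go sub l 0 = -1 then -1 else PySem.Chars.find.go sub l 0 + k := by
  induction l generalizing k with
  | nil => rw [PySem.Chars.find.go.eq_1, PySem.Chars.find.go.eq_1]; simp [List.isEmpty_iff, hsub]
  | cons x xs ih =>
    rw [PySem.Chars.find.go.eq_2, PySem.Chars.find.go.eq_2 sub 0]
    split
    · simp
    · rw [ih (k + 1), ih 1]
      rcases go_nonneg sub hsub xs 0 with h | h
      · simp [h]
      · have h1 : PySem.Chars.find.go sub xs 0 ≠ -1 := by omega
        simp only [h1, if_false]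
        split_ifs with h2
        · omega
        · push_cast; ring

theorem go_sp_nospace (l : List Char) (h : ' ' ∉ l) (k : ℕ) :
    PySem.Chars.find.go [' '] l k = -1 := by
  induction l generalizing k with
  | nil => rw [PySem.Chars.find.go.eq_1]; simp
  | cons x xs ih =>
    rw [PySem.Chars.find.go.eq_2]
    have hx : x ≠ ' ' := fun hx => h (hx ▸ List.mem_cons_self)
    have : ¬ [' '].isPrefixOf (x :: xs) = true := by
      simp [List.isPrefixOf, hx, Ne.symm hx]
    simp only [this, if_false]
    exact ih (fun hm => h (List.mem_cons_of_mem _ hm)) _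

theorem go_sp_space (t r : List Char) (h : ' ' ∉ t) (k : ℕ) :
    PySem.Chars.find.go [' '] (t ++ ' ' :: r) k = (k : ℤ) + t.length := by
  induction t generalizing k with
  | nil =>
    rw [List.nil_append, PySem.Chars.find.go.eq_2]
    simp [List.isPrefixOf]
  | cons x xs ih =>
    rw [List.cons_append, PySem.Chars.find.go.eq_2]
    have hx : x ≠ ' ' := fun hx => h (hx ▸ List.mem_cons_self)
    have : ¬ [' '].isPrefixOf (x :: (xs ++ ' ' :: r)) = true := by
      simp [List.isPrefixOf, hx, Ne.symm hx]
    simp only [this, if_false]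
    rw [ih (fun hm => h (List.mem_cons_of_mem _ hm)) (k + 1)]
    push_cast; simp; ring

theorem go_sc_nospace (l : List Char) (h : ' ' ∉ l) (k : ℕ) :
    PySem.Chars.find.go [' ', ':'] l k = -1 := by
  induction l generalizing k with
  | nil => rw [PySem.Chars.find.go.eq_1]; simp
  | cons x xs ih =>
    rw [PySem.Chars.find.go.eq_2]
    have hx : x ≠ ' ' := fun hx => h (hx ▸ List.mem_cons_self)
    have : ¬ [' ', ':'].isPrefixOf (x :: xs) = true := by
      simp [List.isPrefixOf, Ne.symm hx]
    simp only [this, if_false]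
    exact ih (fun hm => h (List.mem_cons_of_mem _ hm)) _

theorem go_sc_endspace (t : List Char) (h : ' ' ∉ t) (k : ℕ) :
    PySem.Chars.find.go [' ', ':'] (t ++ [' ']) k = -1 := by
  induction t generalizing k with
  | nil =>
    rw [List.nil_append, PySem.Chars.find.go.eq_2]
    have : ¬ [' ', ':'].isPrefixOf [' '] = true := by simp [List.isPrefixOf]
    simp only [this, if_false]
    rw [PySem.Chars.find.go.eq_1]; simp
  | cons x xs ih =>
    rw [List.cons_append, PySem.Chars.find.go.eq_2]
    have hx : x ≠ ' ' := fun hx => h (hx ▸ List.mem_cons_self)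
    have : ¬ [' ', ':'].isPrefixOf (x :: (xs ++ [' '])) = true := by
      simp [List.isPrefixOf, Ne.symm hx]
    simp only [this, if_false]
    exact ih (fun hm => h (List.mem_cons_of_mem _ hm)) _

theorem go_sc_colon (t r : List Char) (h : ' ' ∉ t) (k : ℕ) :
    PySem.Chars.find.go [' ', ':'] (t ++ ' ' :: ':' :: r) k = (k : ℤ) + t.length := by
  induction t generalizing k with
  | nil =>
    rw [List.nil_append, PySem.Chars.find.go.eq_2]
    simp [List.isPrefixOf]
  | cons x xs ih =>
    rw [List.cons_append, PySem.Chars.find.go.eq_2]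
    have hx : x ≠ ' ' := fun hx => h (hx ▸ List.mem_cons_self)
    have : ¬ [' ', ':'].isPrefixOf (x :: (xs ++ ' ' :: ':' :: r)) = true := by
      simp [List.isPrefixOf, Ne.symm hx]
    simp only [this, if_false]
    rw [ih (fun hm => h (List.mem_cons_of_mem _ hm)) (k + 1)]
    push_cast; simp; ring

theorem go_sc_other (t r : List Char) (c : Char) (h : ' ' ∉ t) (hc : c ≠ ':') (k : ℕ) :
    PySem.Chars.find.go [' ', ':'] (t ++ ' ' :: c :: r) k =
      PySem.Chars.find.go [' ', ':'] (c :: r) (k + t.length + 1) := by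
  induction t generalizing k with
  | nil =>
    rw [List.nil_append, PySem.Chars.find.go.eq_2]
    have : ¬ [' ', ':'].isPrefixOf (' ' :: c :: r) = true := by
      simp [List.isPrefixOf, Ne.symm hc]
    simp only [this, if_false]
    norm_num
  | cons x xs ih =>
    rw [List.cons_append, PySem.Chars.find.go.eq_2]
    have hx : x ≠ ' ' := fun hx => h (hx ▸ List.mem_cons_self)
    have : ¬ [' ', ':'].isPrefixOf (x :: (xs ++ ' ' :: c :: r)) = true := by
      simp [List.isPrefixOf, Ne.symm hx]
    simp only [this, if_false]
    rw [ih (fun hm => h (List.mem_cons_of_mem _ hm)) (k + 1)]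
    have : (x :: xs).length = xs.length + 1 := by simp
    rw [this]
    ring_nf
    simp

theorem splitOn_nospace (l : List Char) (h : ' ' ∉ l) : l.splitOn ' ' = [l] := by
  induction l with
  | nil => rfl
  | cons x xs ih =>
    have hx : x ≠ ' ' := fun hx => h (hx ▸ List.mem_cons_self)
    show List.splitOnP (fun y => y == ' ') (x :: xs) = _
    rw [List.splitOnP_cons]
    rw [if_neg (by simp [hx])]
    have := ih (fun hm => h (List.mem_cons_of_mem _ hm))
    rw [show xs.splitOn ' ' = List.splitOnP (fun y => y == ' ') xs from rfl] at this
    rw [this]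
    rfl

theorem splitOn_space (t r : List Char) (h : ' ' ∉ t) :
    (t ++ ' ' :: r).splitOn ' ' = t :: r.splitOn ' ' := by
  induction t with
  | nil =>
    show List.splitOnP (fun y => y == ' ') (' ' :: r) = _
    rw [List.splitOnP_cons]
    simp
    rfl
  | cons x xs ih =>
    have hx : x ≠ ' ' := fun hx => h (hx ▸ List.mem_cons_self)
    show List.splitOnP (fun y => y == ' ') (x :: (xs ++ ' ' :: r)) = _
    rw [List.splitOnP_cons]
    rw [if_neg (by simp [hx])]
    have := ih (fun hm => h (List.mem_cons_of_mem _ hm))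
    rw [show (xs ++ ' ' :: r).splitOn ' ' = List.splitOnP (fun y => y == ' ') (xs ++ ' ' :: r) from rfl] at this
    rw [this]
    rfl

theorem takeWhile_nospace (cs : List Char) : ' ' ∉ cs.takeWhile (fun x => x != ' ') := by
  intro hm
  have := List.mem_takeWhile_imp hm
  simp at this

theorem takeWhile_all (cs : List Char) (h : ' ' ∉ cs) :
    cs.takeWhile (fun x => x != ' ') = cs ∧ cs.dropWhile (fun x => x != ' ') = [] := by
  constructor
  · rw [List.takeWhile_eq_self_iff]
    intro x hx
    simp
    exact fun he => h (he ▸ hx)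
  · rw [List.dropWhile_eq_nil_iff]
    intro x hx
    simp
    exact fun he => h (he ▸ hx)

theorem dropWhile_head_false {p : Char → Bool} : ∀ (l : List Char) (y : Char) (ys : List Char),
    l.dropWhile p = y :: ys → p y = false := by
  intro l
  induction l with
  | nil => intro y ys h; simp at h
  | cons a as ih =>
    intro y ys h
    rw [List.dropWhile_cons] at h
    split at h
    · exact ih y ys h
    · cases h
      simp_all

theorem decomp_space (cs : List Char) (h : ' ' ∈ cs) :
    cs = cs.takeWhile (fun x => x != ' ') ++ ' ' :: ((cs.dropWhile (fun x => x != ' ')).drop 1) := by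
  have hne : cs.dropWhile (fun x => x != ' ') ≠ [] := by
    rw [Ne, List.dropWhile_eq_nil_iff]
    intro hall
    have := hall ' ' h
    simp at this
  conv_lhs => rw [← List.takeWhile_append_dropWhile (p := fun x => x != ' ') (l := cs)]
  congr 1
  obtain ⟨y, ys, hys⟩ := List.exists_cons_of_ne_nil hne
  have hy := dropWhile_head_false cs y ys hys
  simp at hy
  rw [hys, hy]
  simp



theorem sw_colon_iff (l : List Char) : PySem.Chars.startswith l [':'] = true ↔ l.head? = some ':' := by
  cases l with
  | nil => simp [PySem.Chars.startswith, List.isPrefixOf]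
  | cons x xs =>
    show (':' == x && List.isPrefixOf [] xs) = true ↔ _
    rw [List.isPrefixOf]
    simp only [Bool.and_true, beq_iff_eq, List.head?_cons, Option.some_inj]
    exact eq_comm

theorem getLast?_cons_ne_nil {x : String} {L : List String} (h : L ≠ []) :
    (x :: L).getLast? = L.getLast? := by
  cases L with
  | nil => exact absurd rfl h
  | cons y ys => simp [List.getLast?_cons_cons]

theorem splitSp_ne_nil (l : List Char) : splitSp l ≠ [] := by
  simp [splitSp, List.splitOn]
  exact List.splitOnP_ne_nil _ _

theorem Bstep (t r : List Char) (ht : ' ' ∉ t) (hh : (t ++ ' ' :: r).head? ≠ some ':') :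
    recvParamsB (t ++ ' ' :: r) = String.ofList t :: recvParamsB r := by
  have hne : t ++ ' ' :: r ≠ [] := by simp
  have hsw : ¬ PySem.Chars.startswith (t ++ ' ' :: r) [':'] = true := by
    rw [sw_colon_iff]; exact hh
  have hfind0 : PySem.Chars.find (t ++ ' ' :: r) [' ', ':']
      = PySem.Chars.find.go [' ', ':'] (t ++ ' ' :: r) 0 := rfl
  match r with
  | [] =>
    have hk : PySem.Chars.find (t ++ [' ']) [' ', ':'] = -1 := by
      rw [hfind0]; exact go_sc_endspace t ht 0
    rw [recvParamsB, if_neg hne, if_neg hsw]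
    rw [hk, if_pos rfl]
    have hsplit : splitSp (t ++ [' ']) = [String.ofList t, ""] := by
      have := splitOn_space t [] ht
      simp only [splitSp, this]
      rfl
    rw [hsplit]
    simp [recvParamsB]
  | c :: r2 =>
    by_cases hc : c = ':'
    · subst hc
      have hk : PySem.Chars.find (t ++ ' ' :: ':' :: r2) [' ', ':'] = (t.length : ℤ) := by
        rw [hfind0, go_sc_colon t r2 ht 0]; simp
      rw [recvParamsB, if_neg hne, if_neg hsw]
      simp only [hk]
      rw [if_neg (by omega)]
      have hs1 : PySem.List.slice (t ++ ' ' :: ':' :: r2) none (some (t.length : ℤ)) = t := by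
        rw [PySem.List.slice_to _ (by positivity)]
        simp [List.take_left]
      have hs2 : PySem.List.slice (t ++ ' ' :: ':' :: r2) (some ((t.length : ℤ) + 2)) none = r2 := by
        rw [PySem.List.slice_from _ (by positivity)]
        have : ((t.length : ℤ) + 2).toNat = t.length + 2 := by omega
        rw [this, show t.length + 2 = t.length + 2 from rfl]
        rw [List.drop_append]
        simp
      rw [hs1, hs2]
      have : splitSp t = [String.ofList t] := by
        simp only [splitSp, splitOn_nospace t ht]
        rfl
      rw [this]
      have hsw2 : PySem.Chars.startswith (':' :: r2) [':'] = true := by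
        rw [sw_colon_iff]; rfl
      rw [recvParamsB, if_neg (by simp), if_pos hsw2]
      simp
    · have hfind : PySem.Chars.find (t ++ ' ' :: c :: r2) [' ', ':']
          = PySem.Chars.find.go [' ', ':'] (c :: r2) (t.length + 1) := by
        rw [hfind0, go_sc_other t r2 c ht hc 0]
        norm_num
      have hsub : ([' ', ':'] : List Char) ≠ [] := by simp
      have hshift := go_shift [' ', ':'] hsub (c :: r2) (t.length + 1)
      have hf0 : PySem.Chars.find (c :: r2) [' ', ':'] = PySem.Chars.find.go [' ', ':'] (c :: r2) 0 := rfl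
      rcases go_nonneg [' ', ':'] hsub (c :: r2) 0 with hf | hf
      · -- no " :" in the remainder either
        have hk : PySem.Chars.find (t ++ ' ' :: c :: r2) [' ', ':'] = -1 := by
          rw [hfind, hshift, hf, if_pos rfl]
        rw [recvParamsB, if_neg hne, if_neg hsw]
        rw [hk, if_pos rfl]
        have hsplit : splitSp (t ++ ' ' :: c :: r2) = String.ofList t :: splitSp (c :: r2) := by
          unfold splitSp
          rw [splitOn_space t (c :: r2) ht]
          rfl
        rw [hsplit]
        simp only []
        have hLne : splitSp (c :: r2) ≠ [] := splitSp_ne_nil _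
        rw [getLast?_cons_ne_nil hLne]
        have hBr : recvParamsB (c :: r2) =
            (if (splitSp (c :: r2)).getLast? = some "" then (splitSp (c :: r2)).dropLast
             else splitSp (c :: r2)) := by
          rw [recvParamsB, if_neg (by simp), if_neg (by rw [sw_colon_iff]; simp [hc]), hf0, hf, if_pos rfl]
        rw [hBr]

        by_cases hlast : (splitSp (c :: r2)).getLast? = some ""
        · rw [if_pos hlast, if_pos hlast, List.dropLast_cons_of_ne_nil hLne]
        · rw [if_neg hlast, if_neg hlast]
      · -- " :" occurs in the remainder at m
        have hm : PySem.Chars.find.go [' ', ':'] (c :: r2) 0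
            = ((PySem.Chars.find.go [' ', ':'] (c :: r2) 0).toNat : ℤ) := by omega
        set m := (PySem.Chars.find.go [' ', ':'] (c :: r2) 0).toNat with hmdef
        have hk : PySem.Chars.find (t ++ ' ' :: c :: r2) [' ', ':'] = ((m + t.length + 1 : ℕ) : ℤ) := by
          rw [hfind, hshift, if_neg (by omega), hm]
          push_cast; ring
        rw [recvParamsB, if_neg hne, if_neg hsw]
        simp only [hk]
        rw [if_neg (by omega)]
        have hs1 : PySem.List.slice (t ++ ' ' :: c :: r2) none (some ((m + t.length + 1 : ℕ) : ℤ))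
            = t ++ ' ' :: (c :: r2).take m := by
          rw [PySem.List.slice_to _ (by positivity)]
          rw [Int.toNat_natCast]
          rw [show m + t.length + 1 = t.length + (m + 1) by omega]
          rw [List.take_append]
          simp [List.take_cons]
        have hs2 : PySem.List.slice (t ++ ' ' :: c :: r2) (some (((m + t.length + 1 : ℕ) : ℤ) + 2)) none
            = (c :: r2).drop (m + 2) := by
          rw [PySem.List.slice_from _ (by positivity)]
          have : (((m + t.length + 1 : ℕ) : ℤ) + 2).toNat = t.length + (m + 3) := by omega
          rw [this, List.drop_append]
          rw [List.drop_eq_nil_of_le (by omega), List.nil_append]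
          rw [show t.length + (m + 3) - t.length = m + 2 + 1 by omega, List.drop_succ_cons]
        rw [hs1, hs2]
        have hsplit : splitSp (t ++ ' ' :: (c :: r2).take m) = String.ofList t :: splitSp ((c :: r2).take m) := by
          simp only [splitSp]
          rw [show (t ++ ' ' :: (c :: r2).take m).splitOn ' ' = t :: ((c :: r2).take m).splitOn ' ' from
            splitOn_space t _ ht]
          rfl
        rw [hsplit]
        have hBr : recvParamsB (c :: r2) =
            splitSp ((c :: r2).take m) ++ [String.ofList ((c :: r2).drop (m + 2))] := by
          rw [recvParamsB, if_neg (by simp), if_neg (by rw [sw_colon_iff]; simp [hc]), hf0]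
          rw [hm]
          rw [if_neg (by omega)]
          rw [PySem.List.slice_to _ (by positivity), Int.toNat_natCast,
              PySem.List.slice_from _ (by positivity),
              show ((m : ℤ) + 2).toNat = m + 2 by omega]
        rw [hBr]
        rfl

theorem A_nil : recvParamsA [] = [] := by
  rw [recvParamsA.eq_def]

theorem A_colon (r : List Char) : recvParamsA (':' :: r) = [String.ofList r] := by
  rw [recvParamsA.eq_def]
  simp

theorem A_cons (c : Char) (rest : List Char) (hc : c ≠ ':') :
    recvParamsA (c :: rest) =
      String.ofList ((c :: rest).takeWhile (fun x => x != ' ')) ::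
        recvParamsA (((c :: rest).dropWhile (fun x => x != ' ')).drop 1) := by
  rw [recvParamsA.eq_def]
  simp [hc]

theorem tw_app (t r : List Char) (ht : ' ' ∉ t) :
    (t ++ ' ' :: r).takeWhile (fun x => x != ' ') = t ∧
    (t ++ ' ' :: r).dropWhile (fun x => x != ' ') = ' ' :: r := by
  induction t with
  | nil => simp [List.takeWhile_cons, List.dropWhile_cons]
  | cons x xs ih =>
    have hx : x ≠ ' ' := fun h0 => ht (h0 ▸ List.mem_cons_self)
    have h2 := ih (fun hm => ht (List.mem_cons_of_mem _ hm))
    simp only [List.cons_append, List.takeWhile_cons, List.dropWhile_cons]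
    simp [hx, h2.1, h2.2]

theorem Astep (t r : List Char) (ht : ' ' ∉ t) (hh : (t ++ ' ' :: r).head? ≠ some ':') :
    recvParamsA (t ++ ' ' :: r) = String.ofList t :: recvParamsA r := by
  obtain ⟨htw, hdw⟩ := tw_app t r ht
  cases hps : t ++ ' ' :: r with
  | nil => simp at hps
  | cons c rest =>
    have hc : c ≠ ':' := by
      rw [hps] at hh; simp at hh; exact hh
    rw [hps] at htw hdw
    rw [A_cons c rest hc, htw, hdw]
    simp

theorem paramsEq : ∀ (n : ℕ) (ps : List Char), ps.length ≤ n → recvParamsB ps = recvParamsA ps := by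
  intro n
  induction n with
  | zero =>
    intro ps hps
    have : ps = [] := by cases ps with | nil => rfl | cons a as => simp at hps
    subst this
    rw [A_nil]; rfl
  | succ n ih =>
    intro ps hps
    match ps with
    | [] => rw [A_nil]; rfl
    | c :: rest =>
      by_cases hc : c = ':'
      · subst hc
        rw [A_colon]
        rw [recvParamsB, if_neg (by simp), if_pos (by rw [sw_colon_iff]; rfl)]
        rfl
      · by_cases hsp : ' ' ∈ (c :: rest)
        · have hdec := decomp_space (c :: rest) hsp
          have ht := takeWhile_nospace (c :: rest)
          have hh : ((c :: rest).takeWhile (fun x => x != ' ') ++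
              ' ' :: ((c :: rest).dropWhile (fun x => x != ' ')).drop 1).head? ≠ some ':' := by
            rw [← hdec]; simp [hc]
          have hlen : (((c :: rest).dropWhile (fun x => x != ' ')).drop 1).length ≤ n := by
            have h3 := List.length_dropWhile_le (fun x => x != ' ') (c :: rest)
            have hps' : rest.length + 1 ≤ n + 1 := by simpa using hps
            simp only [List.length_drop, List.length_cons] at h3 ⊢
            omega
          rw [hdec, Bstep _ _ ht hh, Astep _ _ ht hh]
          exact congrArg _ (ih _ hlen)
        · obtain ⟨htw, hdw⟩ := takeWhile_all _ hsp
          rw [A_cons c rest hc, htw, hdw]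
          rw [show List.drop 1 ([] : List Char) = [] from rfl, A_nil]
          have hfind : PySem.Chars.find (c :: rest) [' ', ':'] = -1 := go_sc_nospace _ hsp 0
          rw [recvParamsB, if_neg (by simp), if_neg (by rw [sw_colon_iff]; simp [hc])]
          rw [hfind, if_pos rfl]
          have hone : splitSp (c :: rest) = [String.ofList (c :: rest)] := by
            unfold splitSp
            rw [splitOn_nospace _ hsp]
            rfl
          rw [hone]
          simp only [List.getLast?_singleton, List.drop_one]
          rw [if_neg (by
            intro h0
            simp only [Option.some_inj] at h0
            exact absurd (String.ofList_inj.mp h0) (by simp))]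

theorem tailBStep (pre : String) (t r : List Char) (ht : ' ' ∉ t) :
    recvTailB pre (t ++ ' ' :: r) = (pre, String.ofList t, recvParamsA r) := by
  have hfind : PySem.Chars.find (t ++ ' ' :: r) [' '] = (t.length : ℤ) := by
    show PySem.Chars.find.go [' '] (t ++ ' ' :: r) 0 = _
    rw [go_sp_space _ _ ht 0]
    simp
  rw [recvTailB, hfind, if_neg (by omega)]
  rw [PySem.List.slice_to _ (by positivity), Int.toNat_natCast, List.take_left]
  rw [PySem.List.slice_from _ (by positivity),
      show ((t.length : ℤ) + 1).toNat = t.length + 1 by omega]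
  rw [List.drop_append]
  rw [show List.drop (t.length + 1) t = [] from List.drop_eq_nil_of_le (by omega)]
  rw [List.nil_append, show t.length + 1 - t.length = 1 by omega]
  simp only [List.drop_one, List.tail_cons]
  rw [paramsEq r.length r (le_refl _)]

theorem tailAStep (pre : String) (t r : List Char) (ht : ' ' ∉ t) :
    recvTailA pre (t ++ ' ' :: r) = (pre, String.ofList t, recvParamsA r) := by
  obtain ⟨htw, hdw⟩ := tw_app t r ht
  rw [recvTailA]
  simp only [htw, hdw, List.drop_one, List.tail_cons]

theorem tailEq (pre : String) (cs : List Char) : recvTailB pre cs = recvTailA pre cs := by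
  by_cases hsp : ' ' ∈ cs
  · have hdec := decomp_space cs hsp
    have ht := takeWhile_nospace cs
    rw [hdec, tailBStep _ _ _ ht, tailAStep _ _ _ ht]
  · obtain ⟨htw, hdw⟩ := takeWhile_all _ hsp
    have hfind : PySem.Chars.find cs [' '] = -1 := go_sp_nospace _ hsp 0
    rw [recvTailB, recvTailA, hfind, if_pos rfl, htw, hdw]
    rw [show recvParamsB [] = [] from rfl,
        show List.drop 1 ([] : List Char) = [] from rfl, A_nil]

theorem aColon (t r : List Char) (ht : ' ' ∉ t) (hsw : PySem.Chars.startswith (t ++ ' ' :: r) [':'] = true) :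
    recv_py (String.ofList (t ++ ' ' :: r)) = recvTailA (String.ofList t.tail) r := by
  obtain ⟨htw, hdw⟩ := tw_app t r ht
  rw [recv_py]
  simp only [String.toList_ofList, if_pos hsw, htw, hdw]

theorem aPlain (cs : List Char) (hsw : ¬ PySem.Chars.startswith cs [':'] = true) :
    recv_py (String.ofList cs) = recvTailA "" cs := by
  rw [recv_py]
  simp only [String.toList_ofList, if_neg hsw]

theorem altColon (t r : List Char) (ht : ' ' ∉ t) (hsw : PySem.Chars.startswith (t ++ ' ' :: r) [':'] = true) :
    recv_py_alt (String.ofList (t ++ ' ' :: r)) = recvTailB (String.ofList (t.drop 1)) r := by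
  have hfind : PySem.Chars.find (t ++ ' ' :: r) [' '] = (t.length : ℤ) := by
    show PySem.Chars.find.go [' '] (t ++ ' ' :: r) 0 = _
    rw [go_sp_space _ _ ht 0]
    simp
  rw [recv_py_alt]
  simp only [String.toList_ofList, if_pos hsw, hfind]
  rw [if_neg (by omega)]
  rw [PySem.List.slice_to _ (by positivity), Int.toNat_natCast, List.take_left]
  rw [PySem.List.slice_from _ (by positivity),
      show ((t.length : ℤ) + 1).toNat = t.length + 1 by omega]
  rw [List.drop_append]
  rw [show List.drop (t.length + 1) t = [] from List.drop_eq_nil_of_le (by omega)]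
  rw [List.nil_append, show t.length + 1 - t.length = 1 by omega]
  simp only [List.drop_one, List.tail_cons]

theorem altPlain (cs : List Char) (hsw : ¬ PySem.Chars.startswith cs [':'] = true) :
    recv_py_alt (String.ofList cs) = recvTailB "" cs := by
  rw [recv_py_alt]
  simp only [String.toList_ofList, if_neg hsw]

theorem mainEq (msg : String)
    (hpre : PySem.Chars.startswith msg.toList [':'] = true → ' ' ∈ msg.toList) :
    recv_py msg = recv_py_alt msg := by
  have hmsg : msg = String.ofList msg.toList := by simp
  rw [hmsg]
  by_cases hsw : PySem.Chars.startswith msg.toList [':'] = true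
  · have hsp : ' ' ∈ msg.toList := hpre hsw
    have hdec := decomp_space msg.toList hsp
    have ht := takeWhile_nospace msg.toList
    have hsw' : PySem.Chars.startswith
        (msg.toList.takeWhile (fun x => x != ' ') ++
          ' ' :: (msg.toList.dropWhile (fun x => x != ' ')).drop 1) [':'] = true := by
      rw [← hdec]; exact hsw
    rw [hdec, aColon _ _ ht hsw', altColon _ _ ht hsw', ← List.drop_one, tailEq]
  · rw [aPlain _ hsw, altPlain _ hsw, tailEq]

-- ===== VERDICT (by name: the statement is the Claim_ definition above) =====
theorem recv_py_spec : Claim_equal_recv_py := by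
  intro msg _ hpre
  unfold Spec_recv_py
  exact mainEq msg hpre
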